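-- pv_equiv track=rewrite | github.com/IvaylooTs/StarTracker | src/test/main.py | get_initial_identities
-- ===== SOURCE A (Python) =====
-- from collections import defaultdict
--
-- def get_initial_identities(all_votes):
--     """
--     Finds the best single HIP ID candidate for each image star based on raw vote counts.
--
--     Args:
--         all_votes: A dictionary from the hashing stage, like {(star_idx, hip_id): vote_count}
--
--     Returns:
--         A dictionary representing the "proposed solution", like {star_idx: best_hip_id}
--     """
--     star_candidates = defaultdict(list)
--     for (star_idx, hip_id), count in all_votes.items():
--         star_candidates[star_idx].append((hip_id, count))
--
--     proposed_solution = {}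
--     for star_idx, candidates in star_candidates.items():
--         # Sort candidates by vote count (descending) and pick the top one
--         if candidates:
--             best_hip_id, _ = max(candidates, key=lambda item: item[1])
--             proposed_solution[star_idx] = best_hip_id
--
--     return proposed_solution
-- ===== SOURCE B (Python) =====
-- def get_initial_identities(all_votes):
--     """Single pass over the votes: keep, per star, the first hip_id achieving
--     the running maximum vote count (strict > reproduces max's first-max tie rule)."""
--     proposed_solution = {}
--     best_count = {}
--     for (star_idx, hip_id), count in all_votes.items():
--         prev = best_count.get(star_idx)
--         if prev is None or count > prev:
--             proposed_solution[star_idx] = hip_id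
--             best_count[star_idx] = count
--     return proposed_solution
-- ===== Notes on version B (the rewrite author's own statement) =====
-- stated objective: simpler
-- what changed: Replaces the two-phase grouping (defaultdict of per-star candidate lists, then a max() scan per star) by a single pass over the votes that maintains the running best hip_id and best count per star, with strict > reproducing max's first-maximum tie-breaking.
import Mathlib
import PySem

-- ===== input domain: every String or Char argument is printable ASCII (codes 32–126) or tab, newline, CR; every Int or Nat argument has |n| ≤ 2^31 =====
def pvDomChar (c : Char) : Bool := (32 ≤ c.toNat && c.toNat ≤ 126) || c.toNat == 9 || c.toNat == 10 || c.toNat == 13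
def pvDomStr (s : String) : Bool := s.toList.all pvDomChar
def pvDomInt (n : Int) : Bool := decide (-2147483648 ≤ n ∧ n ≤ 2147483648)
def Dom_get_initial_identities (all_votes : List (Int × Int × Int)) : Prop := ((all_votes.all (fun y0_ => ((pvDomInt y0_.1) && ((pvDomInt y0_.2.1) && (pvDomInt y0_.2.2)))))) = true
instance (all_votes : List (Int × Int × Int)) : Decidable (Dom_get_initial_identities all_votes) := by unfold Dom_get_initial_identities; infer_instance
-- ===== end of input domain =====

-- B replaces A's two-phase grouping (per-star candidate lists, then max() per star) by a
-- single pass keeping the running best hip_id and best count per star (objective: simpler).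

-- ===== PORT A =====
-- A's dict argument {(star_idx, hip_id): count} is passed as an association list of
-- triples (star_idx, hip_id, count) in insertion order.
def get_initial_identities (all_votes : List (Int × Int × Int)) : List (Int × Int) :=
  -- star_candidates = defaultdict(list); for (star_idx, hip_id), count: append (hip_id, count)
  let star_candidates : PySem.Dict Int (List (Int × Int)) :=
    all_votes.foldl
      (fun d t => d.insert t.1 (d.getD t.1 [] ++ [(t.2.1, t.2.2)]))
      (PySem.Dict.mk [])
  -- proposed_solution = {}; for star_idx, candidates in star_candidates.items(): …
  (star_candidates.items.foldl
      (fun p sc =>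
        if sc.2 ≠ [] then
          match PySem.List.max? sc.2 (fun item => item.2) with
          | some best => p.insert sc.1 best.1
          | none => p      -- unreachable: max on a nonempty list
        else p)
      (PySem.Dict.mk ([] : List (Int × Int)))).items

-- ===== PORT B =====
def get_initial_identities_alt (all_votes : List (Int × Int × Int)) : List (Int × Int) :=
  -- proposed_solution = {}; best_count = {}; one pass over the votes
  (all_votes.foldl
      (fun st t =>
        match st.2.get? t.1 with   -- prev = best_count.get(star_idx)
        | none => (st.1.insert t.1 t.2.1, st.2.insert t.1 t.2.2)
        | some prev =>
          if prev < t.2.2 then (st.1.insert t.1 t.2.1, st.2.insert t.1 t.2.2)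
          else st)
      ((PySem.Dict.mk ([] : List (Int × Int))), (PySem.Dict.mk ([] : List (Int × Int))))).1.items

-- ===== PRECONDITION & SPEC =====
-- A is total on its dict argument: no Pre_ needed.
def Spec_get_initial_identities (all_votes : List (Int × Int × Int)) (out : List (Int × Int)) : Prop := out = get_initial_identities_alt all_votes
instance (all_votes : List (Int × Int × Int)) (out : List (Int × Int)) : Decidable (Spec_get_initial_identities all_votes out) := by unfold Spec_get_initial_identities; infer_instance

-- ===== CLAIM (what is proved, stated in full; the proofs are below) =====
def Claim_equal_get_initial_identities : Prop := ∀ (all_votes : List (Int × Int × Int)), Dom_get_initial_identities all_votes → Spec_get_initial_identities all_votes (get_initial_identities all_votes)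

-- ===== LEMMAS AND PROOFS =====

-- candidates collected for star s, in vote order
def pvCands (l : List (Int × Int × Int)) (s : Int) : List (Int × Int) :=
  (l.filter (fun t => t.1 == s)).map (fun t => (t.2.1, t.2.2))

-- the first maximum-count candidate for star s (none iff star s has no candidate)
def pvBest (l : List (Int × Int × Int)) (s : Int) : Option (Int × Int) :=
  PySem.List.max? (pvCands l s) (fun it => it.2)

-- the stars, in first-appearance order
def pvKeys (l : List (Int × Int × Int)) : List Int :=
  PySem.List.dedup (l.map (fun t => t.1))

def pvHip (l : List (Int × Int × Int)) (s : Int) : Int := ((pvBest l s).map Prod.fst).getD 0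
def pvCnt (l : List (Int × Int × Int)) (s : Int) : Int := ((pvBest l s).map Prod.snd).getD 0

theorem pv_get_mapD (ss : List Int) {ν : Type} (g : Int → ν) (k : Int) :
    (PySem.Dict.mk (ss.map (fun s => (s, g s)))).get? k
      = if k ∈ ss then some (g k) else none := by
  induction ss with
  | nil => simp [PySem.Dict.get?]
  | cons a tl ih =>
    by_cases h : a = k
    · subst h; simp [PySem.Dict.get?]
    · have hb : (((a, g a) : Int × ν).1 == k) = false := by simp [h]
      simp only [PySem.Dict.get?, List.map_cons, List.find?_cons, hb] at ih ⊢
      rw [ih]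
      simp [Ne.symm h]

theorem pv_contains_mapD (ss : List Int) {ν : Type} (g : Int → ν) (k : Int) :
    (PySem.Dict.mk (ss.map (fun s => (s, g s)))).contains k = decide (k ∈ ss) := by
  simp only [PySem.Dict.contains, List.any_map, Function.comp_def]
  induction ss with
  | nil => simp
  | cons a tl ih =>
    by_cases h : a = k
    · subst h; simp
    · simp [h, Ne.symm h, ih]

theorem pv_insert_mapD_mem (ss : List Int) {ν : Type} (g : Int → ν) (k : Int) (v : ν)
    (h : k ∈ ss) :
    (PySem.Dict.mk (ss.map (fun s => (s, g s)))).insert k v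
      = PySem.Dict.mk (ss.map (fun s => (s, if s = k then v else g s))) := by
  have hc : (PySem.Dict.mk (ss.map (fun s => (s, g s)))).contains k = true := by
    rw [pv_contains_mapD]; simpa
  simp only [PySem.Dict.insert, hc, if_true, List.map_map]
  congr 1
  apply List.map_congr_left
  intro s _
  by_cases hs : s = k
  · subst hs; simp
  · simp [hs]

theorem pv_insert_mapD_new (ss : List Int) {ν : Type} (g : Int → ν) (k : Int) (v : ν)
    (h : k ∉ ss) :
    (PySem.Dict.mk (ss.map (fun s => (s, g s)))).insert k v
      = PySem.Dict.mk (ss.map (fun s => (s, g s)) ++ [(k, v)]) := by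
  have hc : (PySem.Dict.mk (ss.map (fun s => (s, g s)))).contains k = false := by
    rw [pv_contains_mapD]; simpa
  simp [PySem.Dict.insert, hc]

theorem pv_insert_not_contains {ν : Type} (d : PySem.Dict Int ν) (k : Int) (v : ν)
    (h : d.contains k = false) : (d.insert k v).items = d.items ++ [(k, v)] := by
  simp [PySem.Dict.insert, h]

theorem pv_cands_append (l : List (Int × Int × Int)) (t : Int × Int × Int) (s : Int) :
    pvCands (l ++ [t]) s
      = pvCands l s ++ (if t.1 = s then [(t.2.1, t.2.2)] else []) := by
  simp only [pvCands, List.filter_append, List.map_append]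
  congr 1
  by_cases h : t.1 = s
  · simp [List.filter, h]
  · have hb : (t.1 == s) = false := by simp [h]
    simp [List.filter, hb, h]

theorem pv_max_append {α κ : Type} [LT κ] [DecidableLT κ] (cs : List α) (x : α) (key : α → κ) :
    PySem.List.max? (cs ++ [x]) key
      = match PySem.List.max? cs key with
        | none => some x
        | some m => if key m < key x then some x else some m := by
  simp only [PySem.List.max?, List.foldl_append, List.foldl_cons, List.foldl_nil]
  rfl

theorem pv_keys_append (l : List (Int × Int × Int)) (t : Int × Int × Int) :
    pvKeys (l ++ [t]) = if t.1 ∈ pvKeys l then pvKeys l else pvKeys l ++ [t.1] := by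
  simp only [pvKeys, List.map_append, List.map_cons, List.map_nil]
  show PySem.Set.ofList _ = _
  simp only [PySem.Set.ofList, List.foldl_append, List.foldl_cons, List.foldl_nil,
    PySem.Set.add]
  have : (List.foldl PySem.Set.add PySem.Set.empty (l.map fun t => t.1)).contains t.1
      = decide (t.1 ∈ PySem.List.dedup (l.map fun t => t.1)) := by
    simp [PySem.List.dedup, PySem.Set.ofList]
  rw [this]
  by_cases h : t.1 ∈ PySem.List.dedup (l.map fun t => t.1) <;>
    simp [h, PySem.List.dedup, PySem.Set.ofList]

theorem pv_mem_keys_iff (l : List (Int × Int × Int)) (s : Int) :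
    s ∈ pvKeys l ↔ pvCands l s ≠ [] := by
  simp only [pvKeys, PySem.List.mem_dedup, pvCands, List.mem_map]
  constructor
  · rintro ⟨t, ht, rfl⟩
    simp only [ne_eq, List.map_eq_nil_iff, List.filter_eq_nil_iff]
    push Not
    exact ⟨t, ht, by simp⟩
  · intro h
    simp only [ne_eq, List.map_eq_nil_iff, List.filter_eq_nil_iff] at h
    push Not at h
    obtain ⟨t, ht, he⟩ := h
    exact ⟨t, ht, beq_iff_eq.mp (by simpa using he)⟩

theorem pv_max_isSome {α κ : Type} [LT κ] [DecidableLT κ] (cs : List α) (key : α → κ)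
    (h : cs ≠ []) : ∃ m, PySem.List.max? cs key = some m := by
  match cs with
  | [] => exact absurd rfl h
  | y :: ys =>
    clear h
    simp only [PySem.List.max?, List.foldl_cons]
    induction ys generalizing y with
    | nil => exact ⟨y, rfl⟩
    | cons z zs ih =>
      simp only [List.foldl_cons]
      by_cases hk : key y < key z
      · simpa [hk] using ih z
      · simpa [hk] using ih y

theorem pv_best_append (l : List (Int × Int × Int)) (t : Int × Int × Int) (s : Int) :
    pvBest (l ++ [t]) s =
      if t.1 = s then
        (match pvBest l s with
         | none => some (t.2.1, t.2.2)
         | some m => if m.2 < t.2.2 then some (t.2.1, t.2.2) else some m)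
      else pvBest l s := by
  by_cases h : t.1 = s
  · subst h
    have hc : pvCands (l ++ [t]) t.1 = pvCands l t.1 ++ [(t.2.1, t.2.2)] := by
      rw [pv_cands_append]; simp
    simp only [pvBest, hc, pv_max_append, if_pos rfl]
    cases PySem.List.max? (pvCands l t.1) (fun it => it.2) <;> rfl
  · simp [pvBest, pv_cands_append, h]

-- B's one-pass fold computes, in first-appearance key order, the first maximal candidate.
theorem pv_B_closed (l : List (Int × Int × Int)) :
    l.foldl
      (fun st t =>
        match st.2.get? t.1 with
        | none => (st.1.insert t.1 t.2.1, st.2.insert t.1 t.2.2)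
        | some prev =>
          if prev < t.2.2 then (st.1.insert t.1 t.2.1, st.2.insert t.1 t.2.2)
          else st)
      ((PySem.Dict.mk ([] : List (Int × Int))), (PySem.Dict.mk ([] : List (Int × Int))))
    = (PySem.Dict.mk ((pvKeys l).map (fun s => (s, pvHip l s))),
       PySem.Dict.mk ((pvKeys l).map (fun s => (s, pvCnt l s)))) := by
  induction l using List.reverseRecOn with
  | nil => rfl
  | append_singleton xs x ih =>
    rw [List.foldl_append, ih]
    simp only [List.foldl_cons, List.foldl_nil]
    by_cases hmem : x.1 ∈ pvKeys xs
    · have hc : pvCands xs x.1 ≠ [] := (pv_mem_keys_iff xs x.1).mp hmem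
      obtain ⟨m, hm⟩ := pv_max_isSome (pvCands xs x.1) (fun it => it.2) hc
      have hbest : pvBest xs x.1 = some m := hm
      have hkeys : pvKeys (xs ++ [x]) = pvKeys xs := by rw [pv_keys_append, if_pos hmem]
      have hcnt : pvCnt xs x.1 = m.2 := by simp [pvCnt, hbest]
      rw [pv_get_mapD, if_pos hmem]
      by_cases hlt : pvCnt xs x.1 < x.2.2
      · simp only [if_pos hlt]
        rw [pv_insert_mapD_mem _ _ _ _ hmem, pv_insert_mapD_mem _ _ _ _ hmem, hkeys]
        simp only [Prod.mk.injEq]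
        constructor
        · congr 1
          apply List.map_congr_left
          intro s _
          by_cases hs : s = x.1
          · subst hs
            simp only [if_pos rfl, pvHip, pv_best_append, if_pos rfl, hbest]
            rw [hcnt] at hlt
            simp [hlt]
          · simp [hs, pvHip, pv_best_append, Ne.symm hs]
        · congr 1
          apply List.map_congr_left
          intro s _
          by_cases hs : s = x.1
          · subst hs
            simp only [if_pos rfl, pvCnt, pv_best_append, if_pos rfl, hbest]
            rw [hcnt] at hlt
            simp [hlt]
          · simp [hs, pvCnt, pv_best_append, Ne.symm hs]
      · simp only [if_neg hlt]
        rw [hkeys]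
        simp only [Prod.mk.injEq]
        rw [hcnt] at hlt
        constructor
        · congr 1
          apply List.map_congr_left
          intro s _
          by_cases hs : s = x.1
          · subst hs; simp [pvHip, pv_best_append, hbest, hlt]
          · simp [pvHip, pv_best_append, Ne.symm hs]
        · congr 1
          apply List.map_congr_left
          intro s _
          by_cases hs : s = x.1
          · subst hs; simp [pvCnt, pv_best_append, hbest, hlt]
          · simp [pvCnt, pv_best_append, Ne.symm hs]
    · have hcand : pvCands xs x.1 = [] := by
        by_contra hne
        exact hmem ((pv_mem_keys_iff xs x.1).mpr hne)
      have hbest : pvBest xs x.1 = none := by simp [pvBest, hcand, PySem.List.max?]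
      have hkeys : pvKeys (xs ++ [x]) = pvKeys xs ++ [x.1] := by
        rw [pv_keys_append, if_neg hmem]
      rw [pv_get_mapD, if_neg hmem]
      rw [pv_insert_mapD_new _ _ _ _ hmem, pv_insert_mapD_new _ _ _ _ hmem, hkeys]
      simp only [List.map_append, List.map_cons, List.map_nil, Prod.mk.injEq]
      constructor
      · congr 1
        congr 1
        · apply List.map_congr_left
          intro s hs
          have hne : s ≠ x.1 := fun he => hmem (he ▸ hs)
          simp [pvHip, pv_best_append, Ne.symm hne]
        · simp [pvHip, pv_best_append, hbest]
      · congr 1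
        congr 1
        · apply List.map_congr_left
          intro s hs
          have hne : s ≠ x.1 := fun he => hmem (he ▸ hs)
          simp [pvCnt, pv_best_append, Ne.symm hne]
        · simp [pvCnt, pv_best_append, hbest]

-- A's grouping fold builds, in first-appearance key order, the per-star candidate lists.
theorem pv_A_groups (l : List (Int × Int × Int)) :
    l.foldl
      (fun d t => d.insert t.1 (d.getD t.1 [] ++ [(t.2.1, t.2.2)]))
      (PySem.Dict.mk [])
    = PySem.Dict.mk ((pvKeys l).map (fun s => (s, pvCands l s))) := by
  induction l using List.reverseRecOn with
  | nil => rfl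
  | append_singleton xs x ih =>
    rw [List.foldl_append, ih]
    simp only [List.foldl_cons, List.foldl_nil]
    by_cases hmem : x.1 ∈ pvKeys xs
    · have hkeys : pvKeys (xs ++ [x]) = pvKeys xs := by rw [pv_keys_append, if_pos hmem]
      have hget : (PySem.Dict.mk ((pvKeys xs).map (fun s => (s, pvCands xs s)))).getD x.1 []
          = pvCands xs x.1 := by
        simp [PySem.Dict.getD, pv_get_mapD, hmem]
      rw [hget, pv_insert_mapD_mem _ _ _ _ hmem, hkeys]
      congr 1
      apply List.map_congr_left
      intro s _
      by_cases hs : s = x.1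
      · subst hs; simp [pv_cands_append]
      · simp [hs, pv_cands_append, Ne.symm hs]
    · have hcand : pvCands xs x.1 = [] := by
        by_contra hne
        exact hmem ((pv_mem_keys_iff xs x.1).mpr hne)
      have hkeys : pvKeys (xs ++ [x]) = pvKeys xs ++ [x.1] := by
        rw [pv_keys_append, if_neg hmem]
      have hget : (PySem.Dict.mk ((pvKeys xs).map (fun s => (s, pvCands xs s)))).getD x.1 []
          = [] := by
        simp [PySem.Dict.getD, pv_get_mapD, hmem]
      rw [hget, pv_insert_mapD_new _ _ _ _ hmem, hkeys]
      simp only [List.map_append, List.map_cons, List.map_nil]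
      congr 1
      congr 1
      · apply List.map_congr_left
        intro s hs
        have hne : s ≠ x.1 := fun he => hmem (he ▸ hs)
        simp [pv_cands_append, Ne.symm hne]
      · simp [pv_cands_append, hcand]

theorem pv_contains_mk_append {ν : Type} (its : List (Int × ν)) (a : Int) (v : ν) (s : Int) :
    (PySem.Dict.mk (its ++ [(a, v)])).contains s
      = ((PySem.Dict.mk its).contains s || (a == s)) := by
  simp [PySem.Dict.contains, List.any_append]

-- A's selection fold over the grouped lists appends one best pair per star.
theorem pv_A_pick (l : List (Int × Int × Int)) (ss : List Int) (acc : PySem.Dict Int Int)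
    (h1 : ∀ s ∈ ss, pvCands l s ≠ [])
    (h2 : ∀ s ∈ ss, acc.contains s = false)
    (hnd : ss.Nodup) :
    ((ss.map (fun s => (s, pvCands l s))).foldl
        (fun p sc =>
          if sc.2 ≠ [] then
            match PySem.List.max? sc.2 (fun item => item.2) with
            | some best => p.insert sc.1 best.1
            | none => p
          else p) acc).items
      = acc.items ++ ss.map (fun s => (s, pvHip l s)) := by
  induction ss generalizing acc with
  | nil => simp
  | cons a tl ih =>
    have hca : pvCands l a ≠ [] := h1 a (List.mem_cons_self)
    obtain ⟨m, hm⟩ := pv_max_isSome (pvCands l a) (fun it => it.2) hca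
    have hacc : acc.insert a m.1 = PySem.Dict.mk (acc.items ++ [(a, m.1)]) := by
      rw [← pv_insert_not_contains acc a m.1 (h2 a (List.mem_cons_self))]
    have hhip : pvHip l a = m.1 := by simp [pvHip, pvBest, hm]
    simp only [List.map_cons, List.foldl_cons, if_pos hca, hm]
    rw [hacc]
    rw [ih (PySem.Dict.mk (acc.items ++ [(a, m.1)]))
        (fun s hs => h1 s (List.mem_cons_of_mem _ hs))
        (fun s hs => by
          rw [pv_contains_mk_append]
          have hne : a ≠ s := by
            rintro rfl
            exact (List.nodup_cons.mp hnd).1 hs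
          simp [h2 s (List.mem_cons_of_mem _ hs), hne])
        (List.nodup_cons.mp hnd).2]
    simp [hhip]

-- ===== VERDICT (by name: the statement is the Claim_ definition above) =====
theorem get_initial_identities_spec : Claim_equal_get_initial_identities := by
  unfold Claim_equal_get_initial_identities
  intro l _
  unfold Spec_get_initial_identities
  simp only [get_initial_identities, get_initial_identities_alt]
  rw [pv_A_groups, pv_B_closed]
  rw [show (PySem.Dict.mk ((pvKeys l).map (fun s => (s, pvCands l s)))).items
        = (pvKeys l).map (fun s => (s, pvCands l s)) from rfl]
  rw [pv_A_pick l (pvKeys l) (PySem.Dict.mk ([] : List (Int × Int)))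
      (fun s hs => (pv_mem_keys_iff l s).mp hs)
      (fun s _ => rfl)
      (PySem.List.nodup_dedup _)]
  rfl
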